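-- pv_equiv track=rewrite | github.com/petukhovv/tree2vec | lib/FeatureExtraction/Features/AllNGramsExtractor.py | ngrams_recurrent_build
-- ===== SOURCE A (Python) =====
-- from copy import copy
--
-- def ngrams_recurrent_build(n, params, ngrams_on_path, node_type):
--     """
--     Recurrent n-grams building: append of current node type to n-grams of previous nodes
--         (according to max distance).
--
--     :param n: n in n-gram (n-gram order)
--     :param ngrams_on_path: temporary n-gram list for nodes, which are on the current path
--     :param node_type: current node type
--
--     :return: appendant 'n-grams on path' list
--     """
--     grams_on_path = []
--     i = 0
--
--     for ngrams in reversed(ngrams_on_path):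
--         if params['max_distance'] is not None and i >= params['max_distance']:
--             continue
--         if len(ngrams) < n:
--             continue
--         for gram in ngrams[n - 1]:
--             gram_appendant = copy(gram)
--             gram_appendant.append(node_type)
--             grams_on_path.append(gram_appendant)
--         i += 1
--
--     return grams_on_path
-- ===== SOURCE B (Python) =====
-- def ngrams_recurrent_build(n, params, ngrams_on_path, node_type):
--     """Single forward pass maintaining a bounded sliding window (the last
--     max_distance length-eligible n-gram lists), emitted back-to-front."""
--     md = params['max_distance']
--     cap = None if md is None else max(md, 0)
--     window = []
--     for ngrams in ngrams_on_path:
--         if len(ngrams) >= n: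
--             window.append(ngrams)
--             if cap is not None and len(window) > cap:
--                 window.pop(0)
--     result = []
--     for ngrams in reversed(window):
--         for gram in ngrams[n - 1]:
--             result.append(gram + [node_type])
--     return result
-- ===== Notes on version B (the rewrite author's own statement) =====
-- stated objective: alternative
-- what changed: Replaces A's reverse scan with a manual distance counter by a single forward pass that maintains a bounded sliding window holding the last max_distance length-eligible n-gram lists (append + pop-front when over capacity), then emits the window back-to-front.
-- outside the precondition, e.g. on ngrams_recurrent_build(1, {}, [], 'X'): A returns [], B raises KeyError
import Mathlib
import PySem

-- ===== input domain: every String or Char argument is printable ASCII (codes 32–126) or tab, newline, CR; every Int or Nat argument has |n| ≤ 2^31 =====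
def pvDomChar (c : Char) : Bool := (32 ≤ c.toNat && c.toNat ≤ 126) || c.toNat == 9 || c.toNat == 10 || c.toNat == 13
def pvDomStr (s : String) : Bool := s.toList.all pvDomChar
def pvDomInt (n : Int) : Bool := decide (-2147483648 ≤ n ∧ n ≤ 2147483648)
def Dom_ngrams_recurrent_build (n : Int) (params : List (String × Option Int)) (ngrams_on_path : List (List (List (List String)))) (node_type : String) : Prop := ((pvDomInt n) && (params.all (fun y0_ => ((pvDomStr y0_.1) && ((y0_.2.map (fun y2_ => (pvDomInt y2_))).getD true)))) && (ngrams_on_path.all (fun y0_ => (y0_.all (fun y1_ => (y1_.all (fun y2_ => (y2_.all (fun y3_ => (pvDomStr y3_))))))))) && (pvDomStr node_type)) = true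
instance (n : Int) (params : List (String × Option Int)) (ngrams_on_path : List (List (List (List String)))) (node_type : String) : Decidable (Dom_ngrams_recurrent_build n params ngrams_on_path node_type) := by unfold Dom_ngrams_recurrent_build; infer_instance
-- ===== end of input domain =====

-- B replaces A's reverse scan with a manual distance counter by a single forward pass that
-- maintains a bounded sliding window (the last max_distance eligible n-gram lists) and then
-- emits the window back-to-front (objective: alternative).

-- ===== PORT A =====
-- A-side helper: the body of A's loop over the reversed path (accumulated grams, counter i)
def pvStep (n : Int) (t : String) (md : Option Int) (st : List (List String) × Int) (ngrams : List (List (List String))) : List (List String) × Int :=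
  if md.isSome && decide (md.getD 0 ≤ st.2) then st   -- 'max_distance is not None and i >= max_distance'
  else if PySem.List.len ngrams < n then st
  else
    match PySem.List.pyGet? ngrams (n - 1) with
    | none => st  -- IndexError; excluded by Pre_
    | some grams => (st.1 ++ grams.map (fun gram => gram ++ [t]), st.2 + 1)

def ngrams_recurrent_build (n : Int) (params : List (String × Option Int)) (ngrams_on_path : List (List (List (List String)))) (node_type : String) : List (List String) :=
  -- params['max_distance'] is looked up once here; Pre_ requires the key to be present, so the
  -- eager lookup agrees with A's in-loop lookup on every admitted input
  match List.lookup "max_distance" params with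
  | none => []  -- KeyError (reached by A only on a nonempty path); excluded by Pre_
  | some md => (ngrams_on_path.reverse.foldl (pvStep n node_type md) ([], 0)).1

-- ===== PORT B =====
-- B-side helper: the body of B's window loop — append the eligible entry, pop the front when
-- the window exceeds the capacity ('cap is not None and len(window) > cap')
def pvWStep (n : Int) (cap : Option Int) (w : List (List (List (List String)))) (ngrams : List (List (List String))) : List (List (List (List String))) :=
  if n ≤ PySem.List.len ngrams then
    let w' := w ++ [ngrams]
    if cap.isSome && decide (cap.getD 0 < (w'.length : Int)) then w'.tail else w'
  else w

-- B-side helper: the gram-expansion of one window entry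
def pvF (n : Int) (t : String) (ng : List (List (List String))) : List (List String) :=
  match PySem.List.pyGet? ng (n - 1) with
  | none => []  -- IndexError; excluded by Pre_
  | some grams => grams.map (fun gram => gram ++ [t])

def ngrams_recurrent_build_alt (n : Int) (params : List (String × Option Int)) (ngrams_on_path : List (List (List (List String)))) (node_type : String) : List (List String) :=
  match List.lookup "max_distance" params with
  | none => []  -- KeyError; excluded by Pre_
  | some md =>
    let cap : Option Int := md.map (fun d => max d 0)   -- cap = None if md is None else max(md, 0)
    let window := ngrams_on_path.foldl (pvWStep n cap) []
    window.reverse.flatMap (pvF n node_type)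

-- ===== PRECONDITION & SPEC =====
-- the entries A's loop actually reaches (length filtering is trivial when n ≤ 0)
def pvSel (params : List (String × Option Int)) (ngrams_on_path : List (List (List (List String)))) : List (List (List (List String))) :=
  match List.lookup "max_distance" params with
  | some (some d) => ngrams_on_path.reverse.take (max d 0).toNat
  | _ => ngrams_on_path.reverse

-- Pre_ excludes exactly the inputs where A raises, plus one corner where A returns: inputs whose
-- params lack the 'max_distance' key (KeyError whenever the path is nonempty; on an empty path A's
-- lazy in-loop lookup accidentally returns [] while B's up-front lookup still raises), and inputs
-- with n ≤ 0 where some reachable n-gram list makes the negative index ngrams[n-1] an IndexError.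
def Pre_ngrams_recurrent_build (n : Int) (params : List (String × Option Int)) (ngrams_on_path : List (List (List (List String)))) (node_type : String) : Prop :=
  (List.lookup "max_distance" params).isSome ∧
  (1 ≤ n ∨ ∀ ng ∈ pvSel params ngrams_on_path, PySem.Raise.InRange ng.length (n - 1))
instance (n : Int) (params : List (String × Option Int)) (ngrams_on_path : List (List (List (List String)))) (node_type : String) : Decidable (Pre_ngrams_recurrent_build n params ngrams_on_path node_type) := by unfold Pre_ngrams_recurrent_build; infer_instance

def pvWitness_ngrams_recurrent_build : Int × (List (String × Option Int)) × List (List (List (List String))) × String :=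
  (2, [("max_distance", some 2)], [[[["a"]], [["a", "b"]]], [[["c"]]]], "X")

def Spec_ngrams_recurrent_build (n : Int) (params : List (String × Option Int)) (ngrams_on_path : List (List (List (List String)))) (node_type : String) (out : List (List String)) : Prop := out = ngrams_recurrent_build_alt n params ngrams_on_path node_type
instance (n : Int) (params : List (String × Option Int)) (ngrams_on_path : List (List (List (List String)))) (node_type : String) (out : List (List String)) : Decidable (Spec_ngrams_recurrent_build n params ngrams_on_path node_type out) := by unfold Spec_ngrams_recurrent_build; infer_instance

-- ===== CLAIM (what is proved, stated in full; the proofs are below) =====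
def Claim_equal_ngrams_recurrent_build : Prop := ∀ (n : Int) (params : List (String × Option Int)) (ngrams_on_path : List (List (List (List String)))) (node_type : String), Dom_ngrams_recurrent_build n params ngrams_on_path node_type → Pre_ngrams_recurrent_build n params ngrams_on_path node_type → Spec_ngrams_recurrent_build n params ngrams_on_path node_type (ngrams_recurrent_build n params ngrams_on_path node_type)

-- ===== LEMMAS AND PROOFS =====

-- keep the last k elements
def pvTrim (k : Nat) (e : List (List (List (List String)))) : List (List (List (List String))) :=
  e.drop (e.length - k)

theorem pvLoop_none (n : Int) (t : String) (l : List (List (List (List String)))) (acc : List (List String)) (i : Int)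
    (h : ∀ ng ∈ l.filter (fun ng => decide (n ≤ PySem.List.len ng)), (PySem.List.pyGet? ng (n - 1)).isSome) :
    (l.foldl (pvStep n t none) (acc, i)).1
      = acc ++ (l.filter (fun ng => decide (n ≤ PySem.List.len ng))).flatMap (pvF n t) := by
  induction l generalizing acc i with
  | nil => simp
  | cons x l ih =>
    by_cases hx : n ≤ PySem.List.len x
    · have hfc : (x :: l).filter (fun ng => decide (n ≤ PySem.List.len ng))
          = x :: l.filter (fun ng => decide (n ≤ PySem.List.len ng)) :=
        List.filter_cons_of_pos (by simp only [decide_eq_true_eq]; exact hx)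
      rw [hfc] at h
      obtain ⟨grams, hg⟩ := Option.isSome_iff_exists.mp (h x List.mem_cons_self)
      have hx' : ¬ ((x.length : Int) < n) := by simp only [PySem.List.len_eq] at hx; omega
      have hstep : pvStep n t none (acc, i) x = (acc ++ grams.map (fun gram => gram ++ [t]), i + 1) := by
        simp [pvStep, hg, hx']
      rw [List.foldl_cons, hstep, ih _ _ (fun ng hng => h ng (List.mem_cons_of_mem x hng)), hfc]
      simp [pvF, hg]
    · have hfc : (x :: l).filter (fun ng => decide (n ≤ PySem.List.len ng))
          = l.filter (fun ng => decide (n ≤ PySem.List.len ng)) :=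
        List.filter_cons_of_neg (by simp only [decide_eq_true_eq]; exact hx)
      rw [hfc] at h
      have hx' : ((x.length : Int) < n) := by simp only [PySem.List.len_eq] at hx; omega
      have hstep : pvStep n t none (acc, i) x = (acc, i) := by
        simp [pvStep, hx']
      rw [List.foldl_cons, hstep, ih _ _ h, hfc]

theorem pvLoop_some (n : Int) (t : String) (d : Int) (l : List (List (List (List String)))) (acc : List (List String)) (i : Int)
    (h : ∀ ng ∈ (l.filter (fun ng => decide (n ≤ PySem.List.len ng))).take (d - i).toNat, (PySem.List.pyGet? ng (n - 1)).isSome) :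
    (l.foldl (pvStep n t (some d)) (acc, i)).1
      = acc ++ ((l.filter (fun ng => decide (n ≤ PySem.List.len ng))).take (d - i).toNat).flatMap (pvF n t) := by
  induction l generalizing acc i with
  | nil => simp
  | cons x l ih =>
    by_cases hd : d ≤ i
    · have htk : (d - i).toNat = 0 := by omega
      have hstep : pvStep n t (some d) (acc, i) x = (acc, i) := by
        simp [pvStep, hd]
      rw [List.foldl_cons, hstep, ih _ _ (by rw [htk]; intro ng hng; simp at hng), htk]
      simp
    · have hdi : (d - i).toNat = (d - (i + 1)).toNat + 1 := by omega
      by_cases hx : n ≤ PySem.List.len x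
      · have hfc : (x :: l).filter (fun ng => decide (n ≤ PySem.List.len ng))
            = x :: l.filter (fun ng => decide (n ≤ PySem.List.len ng)) :=
          List.filter_cons_of_pos (by simp only [decide_eq_true_eq]; exact hx)
        rw [hfc, hdi, List.take_succ_cons] at h
        obtain ⟨grams, hg⟩ := Option.isSome_iff_exists.mp (h x List.mem_cons_self)
        have hx' : ¬ ((x.length : Int) < n) := by simp only [PySem.List.len_eq] at hx; omega
        have hstep : pvStep n t (some d) (acc, i) x = (acc ++ grams.map (fun gram => gram ++ [t]), i + 1) := by
          simp [pvStep, hg, hx', hd]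
        rw [List.foldl_cons, hstep, ih _ _ (fun ng hng => h ng (List.mem_cons_of_mem x hng)),
          hfc, hdi, List.take_succ_cons]
        simp [pvF, hg]
      · have hfc : (x :: l).filter (fun ng => decide (n ≤ PySem.List.len ng))
            = l.filter (fun ng => decide (n ≤ PySem.List.len ng)) :=
          List.filter_cons_of_neg (by simp only [decide_eq_true_eq]; exact hx)
        rw [hfc] at h
        have hx' : ((x.length : Int) < n) := by simp only [PySem.List.len_eq] at hx; omega
        have hstep : pvStep n t (some d) (acc, i) x = (acc, i) := by
          simp [pvStep, hx', hd]
        rw [List.foldl_cons, hstep, ih _ _ h, hfc]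

-- pvTrim absorbs a previous pvTrim on the left of an append
theorem pvTrim_absorb (k : Nat) (a b : List (List (List (List String)))) :
    pvTrim k (pvTrim k a ++ b) = pvTrim k (a ++ b) := by
  unfold pvTrim
  rw [List.length_append, List.length_append, List.length_drop,
    List.drop_append, List.drop_append, List.drop_drop, List.length_drop]
  congr 1
  · congr 1
    omega
  · congr 1
    omega

-- the window loop computes the last k eligible entries, in forward order
theorem pvWindow_some (n : Int) (c : Int) (hc : 0 ≤ c) (l : List (List (List (List String))))
    (w : List (List (List (List String)))) (hw : w.length ≤ c.toNat) :
    l.foldl (pvWStep n (some c)) w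
      = pvTrim c.toNat (w ++ l.filter (fun ng => decide (n ≤ PySem.List.len ng))) := by
  induction l generalizing w with
  | nil =>
    simp only [List.foldl_nil, List.filter_nil, List.append_nil, pvTrim]
    rw [show w.length - c.toNat = 0 by omega]
    simp
  | cons x l ih =>
    by_cases hx : n ≤ PySem.List.len x
    · have hfc : (x :: l).filter (fun ng => decide (n ≤ PySem.List.len ng))
          = x :: l.filter (fun ng => decide (n ≤ PySem.List.len ng)) :=
        List.filter_cons_of_pos (by simp only [decide_eq_true_eq]; exact hx)
      have hstep : pvWStep n (some c) w x = pvTrim c.toNat (w ++ [x]) := by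
        unfold pvWStep pvTrim
        simp only [if_pos hx, Option.isSome_some, Option.getD_some, Bool.true_and]
        by_cases hfull : c < (((w ++ [x]).length : Nat) : Int)
        · rw [if_pos (by exact decide_eq_true hfull)]
          have : (w ++ [x]).length - c.toNat = 1 := by
            rw [List.length_append]; simp at hfull ⊢; omega
          rw [this, List.drop_one]
        · rw [if_neg (by simpa using hfull)]
          have : (w ++ [x]).length - c.toNat = 0 := by
            rw [List.length_append]; simp at hfull ⊢; omega
          rw [this, List.drop_zero]
      have hlen : (pvTrim c.toNat (w ++ [x])).length ≤ c.toNat := by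
        unfold pvTrim; rw [List.length_drop]; omega
      rw [List.foldl_cons, hstep, ih _ hlen, pvTrim_absorb, hfc]
      simp [List.append_assoc]
    · have hfc : (x :: l).filter (fun ng => decide (n ≤ PySem.List.len ng))
          = l.filter (fun ng => decide (n ≤ PySem.List.len ng)) :=
        List.filter_cons_of_neg (by simp only [decide_eq_true_eq]; exact hx)
      have hstep : pvWStep n (some c) w x = w := by unfold pvWStep; rw [if_neg hx]
      rw [List.foldl_cons, hstep, ih _ hw, hfc]

theorem pvWindow_none (n : Int) (l : List (List (List (List String))))
    (w : List (List (List (List String)))) :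
    l.foldl (pvWStep n none) w = w ++ l.filter (fun ng => decide (n ≤ PySem.List.len ng)) := by
  induction l generalizing w with
  | nil => simp
  | cons x l ih =>
    by_cases hx : n ≤ PySem.List.len x
    · have hstep : pvWStep n none w x = w ++ [x] := by
        unfold pvWStep; rw [if_pos hx]; simp
      rw [List.foldl_cons, hstep, ih,
        List.filter_cons_of_pos (by simp only [decide_eq_true_eq]; exact hx)]
      simp [List.append_assoc]
    · have hstep : pvWStep n none w x = w := by unfold pvWStep; rw [if_neg hx]
      rw [List.foldl_cons, hstep, ih,
        List.filter_cons_of_neg (by simp only [decide_eq_true_eq]; exact hx)]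

-- the reversed window is exactly A's selection: the first k eligible entries of the reversed path
theorem pvWindow_reverse (n : Int) (c : Int) (l : List (List (List (List String)))) :
    (pvTrim c.toNat (l.filter (fun ng => decide (n ≤ PySem.List.len ng)))).reverse
      = (l.reverse.filter (fun ng => decide (n ≤ PySem.List.len ng))).take c.toNat := by
  set e := l.filter (fun ng => decide (n ≤ PySem.List.len ng)) with he
  have hfr : l.reverse.filter (fun ng => decide (n ≤ PySem.List.len ng)) = e.reverse := by
    rw [List.filter_reverse]
  rw [hfr]
  unfold pvTrim
  rw [List.reverse_drop]
  by_cases hk : c.toNat ≤ e.length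
  · congr 1
    omega
  · rw [show e.length - (e.length - c.toNat) = e.length by omega]
    rw [List.take_of_length_le (by simp), List.take_of_length_le (by simp; omega)]

-- under Pre_, every selected entry has a valid index n-1
theorem pvValid (n : Int) (params : List (String × Option Int)) (path : List (List (List (List String)))) (nt2 : String)
    (hpre : Pre_ngrams_recurrent_build n params path nt2)
    (md : Option Int) (hmd : List.lookup "max_distance" params = some md) :
    ∀ ng ∈ (match md with
            | none => path.reverse.filter (fun ng => decide (n ≤ PySem.List.len ng))
            | some d => (path.reverse.filter (fun ng => decide (n ≤ PySem.List.len ng))).take (d - 0).toNat),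
      (PySem.List.pyGet? ng (n - 1)).isSome := by
  intro ng hng
  have hInR : PySem.Raise.InRange ng.length (n - 1) := by
    by_cases hn : 1 ≤ n
    · have hlen : n ≤ PySem.List.len ng := by
        cases md with
        | none => simpa using (List.mem_filter.mp hng).2
        | some d => simpa using (List.mem_filter.mp (List.mem_of_mem_take hng)).2
      simp only [PySem.List.len_eq] at hlen
      simp only [PySem.Raise.InRange]
      omega
    · have hall : ∀ ng ∈ pvSel params path, PySem.Raise.InRange ng.length (n - 1) := by
        rcases hpre.2 with h1 | h2
        · omega
        · exact h2
      apply hall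
      have hid : path.reverse.filter (fun ng => decide (n ≤ PySem.List.len ng)) = path.reverse := by
        apply List.filter_eq_self.mpr
        intro a _
        simp only [PySem.List.len_eq, decide_eq_true_eq]
        omega
      unfold pvSel
      rw [hmd]
      cases md with
      | none =>
        rw [hid] at hng
        exact hng
      | some d =>
        have hng' : ng ∈ List.take (d - 0).toNat path.reverse := by rw [← hid]; exact hng
        have hto : (d - 0).toNat = (max d 0).toNat := by omega
        rw [hto] at hng'
        exact hng'
  rw [Option.isSome_iff_ne_none]
  intro hnone
  exact ((PySem.List.pyGet?_eq_none_iff ng (n - 1)).mp hnone) hInR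

-- ===== VERDICT (by name: the statement is the Claim_ definition above) =====
theorem ngrams_recurrent_build_spec : Claim_equal_ngrams_recurrent_build := by
  intro n params path t _ hpre
  unfold Spec_ngrams_recurrent_build ngrams_recurrent_build ngrams_recurrent_build_alt
  obtain ⟨md, hmd⟩ := Option.isSome_iff_exists.mp hpre.1
  rw [hmd]
  dsimp only
  have hvalid := pvValid n params path t hpre md hmd
  cases md with
  | none =>
    rw [pvLoop_none n t _ [] 0 (by simpa using hvalid)]
    simp only [Option.map_none]
    rw [pvWindow_none]
    simp [List.filter_reverse]
  | some d =>
    rw [pvLoop_some n t d _ [] 0 (by simpa using hvalid)]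
    simp only [Option.map_some]
    rw [pvWindow_some n (max d 0) (le_max_right d 0) _ [] (by simp)]
    simp only [List.nil_append]
    rw [pvWindow_reverse n (max d 0)]
    have : (d - 0).toNat = (max d 0).toNat := by omega
    rw [this]
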